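-- pv_equiv track=rewrite | github.com/seon-2/coding_test_log | 백준/Silver/1713. 후보 추천하기/후보 추천하기.py | solution
-- ===== SOURCE A (Python) =====
-- from collections import defaultdict
--
-- def solution(N, students):
--     photo_frames = []
--     recommend_counts = defaultdict(int)
--     recommend_times = defaultdict(int)
--
--     for idx, student in enumerate(students, start=1):
--         # 1. 이미 사진틀에 있는 경우, 추천 횟수만 증가
--         if student in photo_frames:
--             recommend_counts[student] += 1
--         # 2. 사진틀에 빈 공간이 있는 경우, 추가
--         elif len(photo_frames) < N:
--             photo_frames.append(student)
--             recommend_counts[student] = 1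
--             recommend_times[student] = idx
--         # 3. 사진틀에 빈 공간이 없는 경우, 최소 추천 횟수 및 최오래된 학생 사진 제거 후 추가
--         else:
--             min_count = min(recommend_counts.values())
--             min_students = [s for s, c in recommend_counts.items() if c == min_count]
--             oldest_student = min(min_students, key=lambda x: recommend_times[x])
--
--             photo_frames.remove(oldest_student)
--             del recommend_counts[oldest_student]
--             del recommend_times[oldest_student]
--
--             photo_frames.append(student)
--             recommend_counts[student] = 1
--             recommend_times[student] = idx
--
--     return sorted(photo_frames)
-- ===== SOURCE B (Python) =====
-- def _insert(lst, x):
--     # insert x into an ascending list, keeping it sorted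
--     i = 0
--     while i < len(lst) and lst[i] < x:
--         i += 1
--     return lst[:i] + [x] + lst[i:]
--
-- def solution(N, students):
--     # Priority list: entries (count, time, student) kept in ascending order,
--     # so the eviction candidate is always the head -- no min scans at all.
--     order = []
--     for idx, s in enumerate(students, 1):
--         found = [e for e in order if e[2] == s]
--         if found:
--             c, t, _ = found[0]
--             order = _insert([e for e in order if e[2] != s], (c + 1, t, s))
--         else:
--             if len(order) >= N:
--                 order = order[1:]
--             order = _insert(order, (1, idx, s))
--     return sorted(e[2] for e in order)
-- ===== Notes on version B (the rewrite author's own statement) =====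
-- stated objective: alternative
-- what changed: B keeps a single priority list of (count, time, student) triples in ascending order (ordered insertion on every update), so the eviction candidate is always the head and A's three-pass eviction scan (min of counts, filter the ties, min by time) disappears.
import Mathlib
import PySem

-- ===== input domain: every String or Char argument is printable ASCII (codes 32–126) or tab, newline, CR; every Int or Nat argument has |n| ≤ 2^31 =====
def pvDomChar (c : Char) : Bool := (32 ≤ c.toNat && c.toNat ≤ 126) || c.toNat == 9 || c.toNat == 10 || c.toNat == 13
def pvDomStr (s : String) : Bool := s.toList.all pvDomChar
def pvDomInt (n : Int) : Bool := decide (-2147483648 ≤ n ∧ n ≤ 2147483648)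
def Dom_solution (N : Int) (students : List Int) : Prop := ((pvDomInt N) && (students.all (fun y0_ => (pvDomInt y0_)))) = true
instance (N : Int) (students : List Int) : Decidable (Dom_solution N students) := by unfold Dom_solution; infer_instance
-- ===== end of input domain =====

-- B replaces A's frame list + two count/time dicts with three-pass min-scan eviction
-- by a single priority list of (count, time, student) triples kept in ascending order,
-- so the eviction candidate is always the head (objective: alternative).

-- ===== PORT A =====
def solutionStepA (N : Int) (st : List Int × PySem.Dict Int Int × PySem.Dict Int Int)
    (p : Int × Int) : List Int × PySem.Dict Int Int × PySem.Dict Int Int :=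
  let frames := st.1
  let counts := st.2.1
  let times := st.2.2
  let idx := p.1
  let student := p.2
  if frames.contains student then
    (frames, counts.insert student (counts.getD student 0 + 1), times)
  else if (frames.length : Int) < N then
    (frames ++ [student], counts.insert student 1, times.insert student idx)
  else
    let minCount : Int := (PySem.List.min? counts.values (fun c => c)).getD 0
    let minStudents : List Int := (counts.items.filter (fun q => q.2 == minCount)).map (fun q => q.1)
    let oldest : Int := (PySem.List.min? minStudents (fun s => times.getD s 0)).getD 0
    let frames' := (PySem.List.remove? frames oldest).getD frames
    (frames' ++ [student], (counts.erase oldest).insert student 1,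
      (times.erase oldest).insert student idx)

def solution (N : Int) (students : List Int) : List Int :=
  let st := (PySem.List.enumerate students 1).foldl (solutionStepA N)
              ([], PySem.Dict.empty, PySem.Dict.empty)
  PySem.List.sorted st.1 (fun x => x) false

-- ===== PORT B =====
-- Python tuple '<' on (count, time, student) triples (lexicographic)
def pvLt3 (a b : Int × Int × Int) : Bool :=
  decide (a.1 < b.1) ||
    (a.1 == b.1 && (decide (a.2.1 < b.2.1) || (a.2.1 == b.2.1 && decide (a.2.2 < b.2.2))))

-- port of Source B's _insert: the while-loop computes the insertion index i,
-- then lst[:i] + [x] + lst[i:] (slices via PySem.List.slice, exact for 0 <= i)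
def pvInsIdx (l : List (Int × Int × Int)) (x : Int × Int × Int) : Nat :=
  match l with
  | [] => 0
  | y :: t => if pvLt3 y x then pvInsIdx t x + 1 else 0

def pvIns (l : List (Int × Int × Int)) (x : Int × Int × Int) : List (Int × Int × Int) :=
  PySem.List.slice l none (some (pvInsIdx l x : Int)) ++ [x]
    ++ PySem.List.slice l (some (pvInsIdx l x : Int)) none

def solutionStepB (N : Int) (order : List (Int × Int × Int)) (p : Int × Int) :
    List (Int × Int × Int) :=
  let idx := p.1
  let s := p.2
  match order.filter (fun e => e.2.2 == s) with
  | e :: _ => pvIns (order.filter (fun e => !(e.2.2 == s))) (e.1 + 1, e.2.1, s)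
  | [] =>
    let order1 := if N ≤ (order.length : Int) then PySem.List.slice order (some 1) none else order
    pvIns order1 (1, idx, s)

def solution_alt (N : Int) (students : List Int) : List Int :=
  let order := (PySem.List.enumerate students 1).foldl (solutionStepB N) []
  PySem.List.sorted (order.map (fun e => e.2.2)) (fun x => x) false

-- ===== PRECONDITION & SPEC =====
-- Pre_ excludes N ≤ 0 with a nonempty student list: there the full frame can never
-- admit a student, and A raises ValueError on min() of the empty counts dict.
def Pre_solution (N : Int) (students : List Int) : Prop := students = [] ∨ 1 ≤ N
instance (N : Int) (students : List Int) : Decidable (Pre_solution N students) := by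
  unfold Pre_solution; infer_instance
def pvWitness_solution : Int × List Int := (2, [3, 1, 3, 2, 4])

def Spec_solution (N : Int) (students : List Int) (out : List Int) : Prop := out = solution_alt N students
instance (N : Int) (students : List Int) (out : List Int) : Decidable (Spec_solution N students out) := by unfold Spec_solution; infer_instance

-- ===== CLAIM (what is proved, stated in full; the proofs are below) =====
def Claim_equal_solution : Prop := ∀ (N : Int) (students : List Int), Dom_solution N students → Pre_solution N students → Spec_solution N students (solution N students)

-- ===== LEMMAS AND PROOFS =====

-- proof-side ghost state: the single dict student -> (count, time), in insertion order
def pvStepD (N : Int) (frame : PySem.Dict Int (Int × Int)) (p : Int × Int) :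
    PySem.Dict Int (Int × Int) :=
  let idx := p.1
  let s := p.2
  match frame.get? s with
  | some ct => frame.insert s (ct.1 + 1, ct.2)
  | none =>
    let frame1 :=
      if N ≤ (frame.size : Int) then
        let victim := ((PySem.List.min2? frame.items (fun q => q.2.1) (fun q => q.2.2)).map
                        (fun q => q.1)).getD 0
        frame.erase victim
      else frame
    frame1.insert s (1, idx)

-- "first strict minimum" recursion shared by Python's min/min2? folds
def pvMinFold {α : Type} (lt : α → α → Bool) : List α → Option α
  | [] => none
  | x :: xs =>
    match pvMinFold lt xs with
    | none => some x
    | some m => if lt m x then some m else some x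

def pvBltI : Int → Int → Bool := fun a b => decide (a < b)
def pvBlex : (Int × Int × Int) → (Int × Int × Int) → Bool := fun a b =>
  decide (a.2.1 < b.2.1) || (!decide (b.2.1 < a.2.1) && decide (a.2.2 < b.2.2))
def pvProjC : Int × Int × Int → Int × Int := fun p => (p.1, p.2.1)
def pvProjT : Int × Int × Int → Int × Int := fun p => (p.1, p.2.2)

theorem pvFoldlStep {α : Type} (lt : α → α → Bool)
    (H1 : ∀ a b c, lt a b = true → lt b c = true → lt a c = true)
    (H2 : ∀ a b c, lt a b = false → lt b c = false → lt a c = false) :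
    ∀ (xs : List α) (x : α),
      xs.foldl (fun acc y => match acc with
        | none => some y
        | some m => if lt y m then some y else some m) (some x)
        = match pvMinFold lt xs with
          | none => some x
          | some m => if lt m x then some m else some x := by
  intro xs
  induction xs with
  | nil => intro x; rfl
  | cons y ys ih =>
    intro x
    simp only [List.foldl_cons, pvMinFold]
    by_cases hyx : lt y x = true
    · rw [if_pos hyx]
      rw [ih y]
      cases hys : pvMinFold lt ys with
      | none => simp [hyx]
      | some m =>
        by_cases hmy : lt m y = true
        · simp [hmy, H1 m y x hmy hyx]
        · simp [Bool.not_eq_true] at hmy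
          simp [hmy, hyx]
    · rw [if_neg hyx]
      rw [ih x]
      rw [Bool.not_eq_true] at hyx
      cases hys : pvMinFold lt ys with
      | none => simp [hyx]
      | some m =>
        by_cases hmy : lt m y = true
        · simp [hmy]
        · rw [Bool.not_eq_true] at hmy
          simp [hmy, hyx, H2 m y x hmy hyx]

theorem pvFoldlNone {α : Type} (lt : α → α → Bool)
    (H1 : ∀ a b c, lt a b = true → lt b c = true → lt a c = true)
    (H2 : ∀ a b c, lt a b = false → lt b c = false → lt a c = false)
    (xs : List α) :
    xs.foldl (fun acc y => match acc with
      | none => some y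
      | some m => if lt y m then some y else some m) none = pvMinFold lt xs := by
  cases xs with
  | nil => rfl
  | cons y ys =>
    simp only [List.foldl_cons, pvMinFold]
    rw [pvFoldlStep lt H1 H2 ys y]

theorem pvBlexH1 : ∀ a b c, pvBlex a b = true → pvBlex b c = true → pvBlex a c = true := by
  intro a b c
  simp only [pvBlex, Bool.or_eq_true, Bool.and_eq_true, Bool.not_eq_true', decide_eq_true_eq,
    decide_eq_false_iff_not]
  omega

theorem pvBlexH2 : ∀ a b c, pvBlex a b = false → pvBlex b c = false → pvBlex a c = false := by
  intro a b c
  simp only [pvBlex, Bool.or_eq_false_iff, Bool.and_eq_false_iff, Bool.not_eq_false',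
    decide_eq_true_eq, decide_eq_false_iff_not]
  omega

theorem pvKeyH1 (f : Int → Int) : ∀ a b c, decide (f a < f b) = true → decide (f b < f c) = true →
    decide (f a < f c) = true := by
  intro a b c
  simp only [decide_eq_true_eq]
  omega

theorem pvKeyH2 (f : Int → Int) : ∀ a b c, decide (f a < f b) = false → decide (f b < f c) = false →
    decide (f a < f c) = false := by
  intro a b c
  simp only [decide_eq_false_iff_not]
  omega

theorem pvMin?_key_eq (f : Int → Int) (xs : List Int) :
    PySem.List.min? xs f = pvMinFold (fun a b => decide (f a < f b)) xs := by
  rw [← pvFoldlNone (fun a b => decide (f a < f b)) (pvKeyH1 f) (pvKeyH2 f) xs]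
  simp only [PySem.List.min?]
  congr 1
  funext acc y
  cases acc <;> simp

theorem pvMin?_eq (xs : List Int) :
    PySem.List.min? xs (fun c => c) = pvMinFold pvBltI xs := by
  rw [pvMin?_key_eq (fun c => c) xs]
  rfl

theorem pvMin2?_eq (xs : List (Int × Int × Int)) :
    PySem.List.min2? xs (fun q => q.2.1) (fun q => q.2.2) = pvMinFold pvBlex xs := by
  rw [← pvFoldlNone pvBlex pvBlexH1 pvBlexH2 xs]
  rfl

theorem pvMinFold_mem {α : Type} (lt : α → α → Bool) :
    ∀ (xs : List α) (m : α), pvMinFold lt xs = some m → m ∈ xs := by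
  intro xs
  induction xs with
  | nil => intro m h; simp [pvMinFold] at h
  | cons y ys ih =>
    intro m h
    simp only [pvMinFold] at h
    cases hys : pvMinFold lt ys with
    | none => rw [hys] at h; simp at h; simp [h]
    | some m' =>
      rw [hys] at h
      dsimp only at h
      by_cases hlt : lt m' y = true
      · rw [if_pos hlt] at h
        cases h
        exact List.mem_cons_of_mem _ (ih _ hys)
      · rw [if_neg hlt] at h
        cases h
        exact List.mem_cons_self


theorem pvMinFold_none {α : Type} (lt : α → α → Bool) :
    ∀ (xs : List α), pvMinFold lt xs = none ↔ xs = [] := by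
  intro xs
  cases xs with
  | nil => simp [pvMinFold]
  | cons y ys =>
    simp only [pvMinFold]
    cases pvMinFold lt ys with
    | none => simp
    | some m => by_cases h : lt m y = true <;> simp [h]

theorem pvMinFoldI_le : ∀ (xs : List Int) (v : Int),
    pvMinFold pvBltI xs = some v → ∀ y ∈ xs, v ≤ y := by
  intro xs
  induction xs with
  | nil => intro v h; simp [pvMinFold] at h
  | cons y ys ih =>
    intro v h z hz
    simp only [pvMinFold] at h
    cases hys : pvMinFold pvBltI ys with
    | none =>
      rw [hys] at h
      rw [(pvMinFold_none pvBltI ys).mp hys] at hz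
      simp at h hz
      omega
    | some m' =>
      rw [hys] at h
      dsimp only at h
      have hle := ih _ hys
      by_cases hlt : pvBltI m' y = true
      · rw [if_pos hlt] at h
        cases h
        simp only [pvBltI, decide_eq_true_eq] at hlt
        rcases List.mem_cons.mp hz with h1 | h1
        · omega
        · exact hle z h1
      · rw [if_neg hlt] at h
        cases h
        simp only [pvBltI, decide_eq_true_eq] at hlt
        rcases List.mem_cons.mp hz with h1 | h1
        · omega
        · have := hle z h1
          omega

-- the first component of the lexicographic minimum is the minimum count
theorem pvLexFst : ∀ (M : List (Int × Int × Int)) (v : Int) (m : Int × Int × Int),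
    pvMinFold pvBltI (M.map (fun p => p.2.1)) = some v →
    pvMinFold pvBlex M = some m → m.2.1 = v := by
  intro M
  induction M with
  | nil => intro v m hv hm; simp [pvMinFold] at hm
  | cons p rest ih =>
    intro v m hv hm
    simp only [List.map_cons, pvMinFold] at hv hm
    cases hrest : pvMinFold pvBlex rest with
    | none =>
      have hre : rest = [] := (pvMinFold_none _ _).mp hrest
      subst hre
      simp only [List.map_nil, pvMinFold] at hv hm
      injection hv with hv
      injection hm with hm
      rw [← hm, ← hv]
    | some m' =>
      obtain ⟨c', hc'⟩ : ∃ c', pvMinFold pvBltI (rest.map (fun q => q.2.1)) = some c' := by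
        cases hx : pvMinFold pvBltI (rest.map fun q => q.2.1) with
        | none =>
          exfalso
          have h0 := (pvMinFold_none _ _).mp hx
          have h1 : rest = [] := by
            cases rest with
            | nil => rfl
            | cons a b => simp at h0
          rw [h1] at hrest
          simp [pvMinFold] at hrest
        | some c => exact ⟨c, rfl⟩
      rw [hc'] at hv
      rw [hrest] at hm
      dsimp only at hv hm
      have hm'c : m'.2.1 = c' := ih c' m' hc' hrest
      by_cases h1 : pvBltI c' p.2.1 = true
      · rw [if_pos h1] at hv
        injection hv with hv
        simp only [pvBltI, decide_eq_true_eq] at h1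
        have hlex : pvBlex m' p = true := by
          simp only [pvBlex, Bool.or_eq_true, Bool.and_eq_true, Bool.not_eq_true',
            decide_eq_true_eq, decide_eq_false_iff_not]
          omega
        rw [if_pos hlex] at hm
        injection hm with hm
        rw [← hm, ← hv]
        exact hm'c
      · rw [if_neg h1] at hv
        injection hv with hv
        simp only [pvBltI, decide_eq_true_eq] at h1
        by_cases h2 : pvBlex m' p = true
        · rw [if_pos h2] at hm
          injection hm with hm
          simp only [pvBlex, Bool.or_eq_true, Bool.and_eq_true, Bool.not_eq_true',
            decide_eq_true_eq, decide_eq_false_iff_not] at h2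
          rw [← hm, ← hv]
          omega
        · rw [if_neg h2] at hm
          injection hm with hm
          rw [← hm, ← hv]

-- A's min-count / filter / min-time pick equals the single lexicographic pick
theorem pvMain (f : Int → Int) : ∀ (M : List (Int × Int × Int)),
    (∀ p ∈ M, f p.1 = p.2.2) →
    ∀ c, pvMinFold pvBltI (M.map (fun p => p.2.1)) = some c →
    pvMinFold (fun a b => decide (f a < f b))
        ((M.filter (fun p => p.2.1 == c)).map (fun p => p.1))
      = (pvMinFold pvBlex M).map (fun p => p.1) := by
  intro M
  induction M with
  | nil => intro hf c hmc; simp [pvMinFold] at hmc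
  | cons p rest ih =>
    intro hf c hmc
    have hfr : ∀ q ∈ rest, f q.1 = q.2.2 := fun q hq => hf q (List.mem_cons_of_mem _ hq)
    have hfp : f p.1 = p.2.2 := hf p List.mem_cons_self
    simp only [List.map_cons, pvMinFold] at hmc
    cases hrc : pvMinFold pvBltI (rest.map fun q => q.2.1) with
    | none =>
      have h1 : rest = [] := by
        have h0 := (pvMinFold_none _ _).mp hrc
        cases rest with
        | nil => rfl
        | cons a b => simp at h0
      subst h1
      rw [hrc] at hmc
      dsimp only at hmc
      injection hmc with hmc
      subst hmc
      simp [pvMinFold]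
    | some c' =>
      rw [hrc] at hmc
      dsimp only at hmc
      obtain ⟨m', hm'⟩ : ∃ m', pvMinFold pvBlex rest = some m' := by
        cases hx : pvMinFold pvBlex rest with
        | none =>
          exfalso
          have h0 := (pvMinFold_none _ _).mp hx
          subst h0
          simp [pvMinFold] at hrc
        | some m => exact ⟨m, rfl⟩
      have hm'c : m'.2.1 = c' := pvLexFst rest c' m' hrc hm'
      have hm'mem : m' ∈ rest := pvMinFold_mem _ _ _ hm'
      have hle : ∀ q ∈ rest, c' ≤ q.2.1 := by
        intro q hq
        exact pvMinFoldI_le _ c' hrc q.2.1 (List.mem_map_of_mem hq)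
      by_cases h1 : pvBltI c' p.2.1 = true
      · rw [if_pos h1] at hmc
        injection hmc with hmc
        subst hmc
        simp only [pvBltI, decide_eq_true_eq] at h1
        have hfilt : (p.2.1 == c') = false := by
          simp only [beq_eq_false_iff_ne]
          omega
        have hlex : pvBlex m' p = true := by
          simp only [pvBlex, Bool.or_eq_true, decide_eq_true_eq]
          omega
        rw [List.filter_cons_of_neg (by simp only [hfilt]; exact Bool.false_ne_true)]
        rw [ih hfr c' hrc, hm']
        simp only [pvMinFold, hm', hlex]
        rfl
      · rw [if_neg h1] at hmc
        injection hmc with hmc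
        subst hmc
        simp only [pvBltI, decide_eq_true_eq] at h1
        rw [List.filter_cons_of_pos (by simp)]
        simp only [List.map_cons, pvMinFold, hm']
        by_cases hgt : p.2.1 < c'
        · have hks : rest.filter (fun q => q.2.1 == p.2.1) = [] := by
            rw [List.filter_eq_nil_iff]
            intro q hq
            have := hle q hq
            simp only [beq_iff_eq]
            omega
          have hlex : pvBlex m' p = false := by
            simp only [pvBlex, Bool.or_eq_false_iff, Bool.and_eq_false_iff, Bool.not_eq_false',
              decide_eq_true_eq, decide_eq_false_iff_not]
            omega
          rw [hks]
          simp only [List.map_nil, pvMinFold, hlex]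
          rfl
        · have hceq : c' = p.2.1 := by omega
          subst hceq
          rw [ih hfr _ hrc, hm']
          have hfm' : f m'.1 = m'.2.2 := hfr m' hm'mem
          dsimp only [Option.map_some]
          by_cases ht : m'.2.2 < p.2.2
          · have hblex : pvBlex m' p = true := by
              simp only [pvBlex, Bool.or_eq_true, Bool.and_eq_true, Bool.not_eq_true',
                decide_eq_true_eq, decide_eq_false_iff_not]
              omega
            rw [if_pos (by simp only [decide_eq_true_eq]; omega), if_pos hblex]
            rfl
          · have hblex : pvBlex m' p = false := by
              simp only [pvBlex, Bool.or_eq_false_iff, Bool.and_eq_false_iff, Bool.not_eq_false',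
                decide_eq_true_eq, decide_eq_false_iff_not]
              omega
            rw [if_neg (by simp only [decide_eq_true_eq]; omega), hblex]
            simp

theorem pvRemoveNodup : ∀ (l : List Int) (v : Int), l.Nodup → v ∈ l →
    PySem.List.remove? l v = some (l.filter (fun x => !(x == v))) := by
  intro l
  induction l with
  | nil => intro v _ hv; simp at hv
  | cons a t ih =>
    intro v hnd hv
    by_cases hav : a = v
    · subst hav
      have hvt : a ∉ t := (List.nodup_cons.mp hnd).1
      have hft : t.filter (fun x => !(x == a)) = t := by
        rw [List.filter_eq_self]
        intro x hx
        simp only [Bool.not_eq_eq_eq_not, Bool.not_true, beq_eq_false_iff_ne]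
        exact fun h => hvt (h ▸ hx)
      simp only [PySem.List.remove?]
      rw [show List.idxOf? a (a :: t) = some 0 from by simp [List.idxOf?, List.findIdx?_cons]]
      simp [hft]
    · have hvt : v ∈ t := by
        rcases List.mem_cons.mp hv with h | h
        · exact absurd h.symm hav
        · exact h
      have := ih v (List.nodup_cons.mp hnd).2 hvt
      simp only [PySem.List.remove?, List.idxOf?] at this ⊢
      rw [List.findIdx?_cons]
      have hba : (a == v) = false := by simp [hav]
      simp only [hba, Bool.false_eq_true, if_neg (by simp : ¬False)]
      cases hfi : List.findIdx? (fun x => x == v) t with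
      | none => rw [hfi] at this; simp at this
      | some k =>
        rw [hfi] at this
        simp only [Option.map_some] at this ⊢
        injection this with this
        simp [List.eraseIdx_cons_succ, this, hba]

theorem pvFindMapFst {γ δ : Type} (u : (Int × γ) → (Int × δ)) (hu : ∀ p, (u p).1 = p.1)
    (G : List (Int × γ)) (s : Int) :
    List.find? (fun q => q.1 == s) (G.map u) = (List.find? (fun q => q.1 == s) G).map u := by
  induction G with
  | nil => rfl
  | cons p R ih =>
    simp only [List.map_cons]
    cases h : (p.1 == s) with
    | true =>
      rw [List.find?_cons_of_pos (by simp [hu, h]), List.find?_cons_of_pos (by simp [h])]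
      rfl
    | false =>
      rw [List.find?_cons_of_neg (by simp [hu, h]), List.find?_cons_of_neg (by simp [h]), ih]

theorem pvAnyMapFst {γ δ : Type} (u : (Int × γ) → (Int × δ)) (hu : ∀ p, (u p).1 = p.1)
    (G : List (Int × γ)) (s : Int) :
    (G.map u).any (fun q => q.1 == s) = G.any (fun q => q.1 == s) := by
  simp [List.any_map, Function.comp_def, hu]

theorem pvStep (N : Int) (F : PySem.Dict Int (Int × Int)) (hnd : F.keys.Nodup) (p : Int × Int) :
    solutionStepA N (F.keys, PySem.Dict.mk (F.items.map pvProjC), PySem.Dict.mk (F.items.map pvProjT)) p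
      = ((pvStepD N F p).keys,
         PySem.Dict.mk ((pvStepD N F p).items.map pvProjC),
         PySem.Dict.mk ((pvStepD N F p).items.map pvProjT))
    ∧ (pvStepD N F p).keys.Nodup := by
  obtain ⟨idx, s⟩ := p
  simp only [solutionStepA, pvStepD]
  cases hg : F.get? s with
  | some ct =>
    have hmem : (s, ct) ∈ F.items := PySem.Dict.mem_items_of_get?_eq_some F hg
    have hFc : F.contains s = true := by rw [PySem.Dict.contains_eq_isSome_get?, hg]; rfl
    have hkc : F.keys.contains s = true := by
      have : s ∈ F.keys := by
        simp only [PySem.Dict.keys]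
        exact List.mem_map_of_mem (f := Prod.fst) hmem
      simpa using this
    rw [if_pos hkc]
    have hitems := PySem.Dict.items_insert_of_contains F (ct.1 + 1, ct.2) hFc
    have hkeys := PySem.Dict.keys_insert_of_contains F (ct.1 + 1, ct.2) hFc
    have hCc : (PySem.Dict.mk (F.items.map pvProjC)).contains s = true := by
      show (F.items.map pvProjC).any (fun q => q.1 == s) = true
      rw [pvAnyMapFst pvProjC (fun p => rfl)]
      exact hFc
    have hCget : (PySem.Dict.mk (F.items.map pvProjC)).getD s 0 = ct.1 := by
      simp only [PySem.Dict.getD, PySem.Dict.get?]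
      rw [pvFindMapFst pvProjC (fun p => rfl)]
      have hdef : (List.find? (fun q => q.1 == s) F.items).map (fun x => x.2) = some ct := hg
      cases hf : List.find? (fun q => q.1 == s) F.items with
      | none => rw [hf] at hdef; simp at hdef
      | some q =>
        rw [hf] at hdef
        simp only [Option.map_some, Option.some.injEq] at hdef
        simp [pvProjC, hdef]
    refine ⟨?_, ?_⟩
    · simp only [Prod.mk.injEq]
      refine ⟨hkeys.symm, ?_, ?_⟩
      · rw [hCget]
        apply PySem.Dict.ext
        rw [PySem.Dict.items_insert_of_contains _ (ct.1 + 1) hCc]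
        show (F.items.map pvProjC).map _ = (F.insert s (ct.1 + 1, ct.2)).items.map pvProjC
        rw [hitems, List.map_map, List.map_map]
        apply List.map_congr_left
        intro q _
        by_cases hq1 : (q.1 == s) = true <;> simp [Function.comp, pvProjC, hq1]
      · apply PySem.Dict.ext
        show F.items.map pvProjT = (F.insert s (ct.1 + 1, ct.2)).items.map pvProjT
        rw [hitems, List.map_map]
        apply List.map_congr_left
        intro q hq
        by_cases hq1 : (q.1 == s) = true
        · have hqs : q.1 = s := by simpa using hq1
          have hq2 : q.2 = ct := by
            have := PySem.Dict.get?_of_mem_items (d := F) (k := q.1) (v := q.2) hq hnd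
            rw [hqs, hg] at this
            injection this with this
            exact this.symm
          simp [Function.comp, pvProjT, hqs, hq2]
        · simp [Function.comp, pvProjT, hq1]
    · rw [hkeys]
      exact hnd
  | none =>
    have hfind : List.find? (fun q => q.1 == s) F.items = none := by
      have : (List.find? (fun q => q.1 == s) F.items).map (fun x => x.2) = none := hg
      cases hf : List.find? (fun q => q.1 == s) F.items with
      | none => rfl
      | some q => rw [hf] at this; simp at this
    have hnotmem : s ∉ F.keys := by
      intro hs
      rcases List.mem_map.mp hs with ⟨q, hq, hq1⟩
      have := List.find?_eq_none.mp hfind q hq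
      simp [hq1] at this
    have hkc : F.keys.contains s = false := by simpa using hnotmem
    have hFc : F.contains s = false := by rw [PySem.Dict.contains_eq_isSome_get?, hg]; rfl
    rw [if_neg (by rw [hkc]; exact Bool.false_ne_true)]
    have hlen : F.keys.length = F.size := by
      simp [PySem.Dict.keys, PySem.Dict.size]
    by_cases hN : (F.keys.length : Int) < N
    · rw [if_pos hN, if_neg (by omega : ¬ N ≤ (F.size : Int))]
      have hitems := PySem.Dict.items_insert_of_not_contains F (1, idx) hFc
      have hCc : (PySem.Dict.mk (F.items.map pvProjC)).contains s = false := by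
        show (F.items.map pvProjC).any (fun q => q.1 == s) = false
        rw [pvAnyMapFst pvProjC (fun p => rfl)]
        exact hFc
      have hTc : (PySem.Dict.mk (F.items.map pvProjT)).contains s = false := by
        show (F.items.map pvProjT).any (fun q => q.1 == s) = false
        rw [pvAnyMapFst pvProjT (fun p => rfl)]
        exact hFc
      refine ⟨?_, ?_⟩
      · simp only [Prod.mk.injEq]
        refine ⟨?_, ?_, ?_⟩
        · show F.keys ++ [s] = (F.insert s (1, idx)).keys
          simp [PySem.Dict.keys, hitems]
        · apply PySem.Dict.ext
          rw [PySem.Dict.items_insert_of_not_contains _ 1 hCc]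
          show F.items.map pvProjC ++ [(s, 1)] = (F.insert s (1, idx)).items.map pvProjC
          rw [hitems, List.map_append]
          rfl
        · apply PySem.Dict.ext
          rw [PySem.Dict.items_insert_of_not_contains _ idx hTc]
          show F.items.map pvProjT ++ [(s, idx)] = (F.insert s (1, idx)).items.map pvProjT
          rw [hitems, List.map_append]
          rfl
      · show (F.insert s (1, idx)).keys.Nodup
        simp only [PySem.Dict.keys, hitems, List.map_append]
        simp only [List.nodup_append]
        refine ⟨by simpa [PySem.Dict.keys] using hnd, by simp, ?_⟩
        intro a ha b hb
        simp only [List.map_cons, List.map_nil, List.mem_singleton] at hb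
        subst hb
        intro hab
        subst hab
        exact hnotmem (by simpa [PySem.Dict.keys] using ha)
    · rw [if_neg hN, if_pos (by omega : N ≤ (F.size : Int))]
      by_cases hGe : F.items = []
      · have hFe : F = PySem.Dict.mk [] := PySem.Dict.ext hGe
        subst hFe
        refine ⟨?_, ?_⟩
        · simp [PySem.Dict.keys, PySem.Dict.values, PySem.Dict.erase, PySem.Dict.insert,
            PySem.Dict.contains, PySem.Dict.getD, PySem.Dict.get?, PySem.List.min?,
            PySem.List.min2?, PySem.List.remove?, List.idxOf?, pvProjC, pvProjT]
        · simp [PySem.Dict.keys, PySem.Dict.erase, PySem.Dict.insert, PySem.Dict.contains,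
            PySem.List.min2?]
      · obtain ⟨c, hc⟩ : ∃ c, pvMinFold pvBltI (F.items.map (fun q => q.2.1)) = some c := by
          cases hx : pvMinFold pvBltI (F.items.map fun q => q.2.1) with
          | none =>
            exfalso
            have h0 := (pvMinFold_none _ _).mp hx
            exact hGe (by cases hGi : F.items with
              | nil => rfl
              | cons a b => rw [hGi] at h0; simp at h0)
          | some c => exact ⟨c, rfl⟩
        obtain ⟨m, hm⟩ : ∃ m, pvMinFold pvBlex F.items = some m := by
          cases hx : pvMinFold pvBlex F.items with
          | none => exact absurd ((pvMinFold_none _ _).mp hx) hGe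
          | some m => exact ⟨m, rfl⟩
        have hmmem : m ∈ F.items := pvMinFold_mem _ _ _ hm
        have hm1keys : m.1 ∈ F.keys := List.mem_map_of_mem (f := Prod.fst) hmmem
        have hallnot : ∀ q ∈ F.items, (q.1 == s) = false := by
          intro q hq
          simpa using List.find?_eq_none.mp hfind q hq
        have hf : ∀ q ∈ F.items, (PySem.Dict.mk (F.items.map pvProjT)).getD q.1 0 = q.2.2 := by
          intro q hq
          have hk : (PySem.Dict.mk (F.items.map pvProjT)).keys.Nodup := by
            simp only [PySem.Dict.keys, List.map_map]
            exact hnd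
          have hget := PySem.Dict.get?_of_mem_items (d := PySem.Dict.mk (F.items.map pvProjT))
            (k := q.1) (v := q.2.2) (List.mem_map_of_mem (f := pvProjT) hq) hk
          simp [PySem.Dict.getD, hget]
        have hmain := pvMain (fun x => (PySem.Dict.mk (F.items.map pvProjT)).getD x 0) F.items hf c hc
        rw [hm] at hmain
        rw [show (PySem.Dict.mk (F.items.map pvProjC)).values = F.items.map (fun q => q.2.1) from by
          simp only [PySem.Dict.values, List.map_map]; rfl]
        rw [pvMin?_eq, hc]
        simp only [Option.getD_some]
        have e1 : (PySem.List.min? (List.map (fun q => q.1) (List.filter (fun q => q.2 == c) (List.map pvProjC F.items)))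
            (fun x => (PySem.Dict.mk (List.map pvProjT F.items)).getD x 0)).getD 0 = m.1 := by
          rw [List.filter_map, List.map_map]
          rw [pvMin?_key_eq]
          rw [show (List.map ((fun (q : Int × Int) => q.1) ∘ pvProjC)
                (List.filter ((fun (q : Int × Int) => q.2 == c) ∘ pvProjC) F.items))
              = List.map (fun p => p.1) (List.filter (fun p => p.2.1 == c) F.items) from rfl]
          rw [hmain]
          rfl
        rw [e1, pvMin2?_eq, hm]
        simp only [Option.map_some, Option.getD_some]
        rw [pvRemoveNodup F.keys m.1 hnd hm1keys]
        simp only [Option.getD_some]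
        have herC : (PySem.Dict.mk (List.map pvProjC F.items)).erase m.1
            = PySem.Dict.mk ((F.items.filter (fun p => !(p.1 == m.1))).map pvProjC) := by
          apply PySem.Dict.ext
          show List.filter _ (List.map pvProjC F.items) = _
          rw [List.filter_map]
          rfl
        have herT : (PySem.Dict.mk (List.map pvProjT F.items)).erase m.1
            = PySem.Dict.mk ((F.items.filter (fun p => !(p.1 == m.1))).map pvProjT) := by
          apply PySem.Dict.ext
          show List.filter _ (List.map pvProjT F.items) = _
          rw [List.filter_map]
          rfl
        have herB : (F.erase m.1).items = F.items.filter (fun p => !(p.1 == m.1)) := rfl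
        have hanyF : ∀ (G' : List (Int × Int × Int)), (∀ q ∈ G', q ∈ F.items) →
            G'.any (fun q => q.1 == s) = false := by
          intro G' hsub
          rw [List.any_eq_false]
          intro q hq
          simp [hallnot q (hsub q hq)]
        have hCc2 : (PySem.Dict.mk ((F.items.filter (fun p => !(p.1 == m.1))).map pvProjC)).contains s = false := by
          show ((F.items.filter (fun p => !(p.1 == m.1))).map pvProjC).any (fun q => q.1 == s) = false
          rw [pvAnyMapFst pvProjC (fun p => rfl)]
          exact hanyF _ (fun q hq => List.mem_of_mem_filter hq)
        have hTc2 : (PySem.Dict.mk ((F.items.filter (fun p => !(p.1 == m.1))).map pvProjT)).contains s = false := by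
          show ((F.items.filter (fun p => !(p.1 == m.1))).map pvProjT).any (fun q => q.1 == s) = false
          rw [pvAnyMapFst pvProjT (fun p => rfl)]
          exact hanyF _ (fun q hq => List.mem_of_mem_filter hq)
        have hBc2 : (F.erase m.1).contains s = false := by
          show (F.erase m.1).items.any (fun q => q.1 == s) = false
          rw [herB]
          exact hanyF _ (fun q hq => List.mem_of_mem_filter hq)
        have hinsB := PySem.Dict.items_insert_of_not_contains (F.erase m.1) (1, idx) hBc2
        rw [herC, herT]
        refine ⟨?_, ?_⟩
        · simp only [Prod.mk.injEq]
          refine ⟨?_, ?_, ?_⟩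
          · show F.keys.filter (fun x => !(x == m.1)) ++ [s] = _
            simp only [PySem.Dict.keys, hinsB, herB, List.map_append]
            rw [List.filter_map]
            rfl
          · apply PySem.Dict.ext
            rw [PySem.Dict.items_insert_of_not_contains _ 1 hCc2]
            show (F.items.filter (fun p => !(p.1 == m.1))).map pvProjC ++ [(s, 1)]
              = ((F.erase m.1).insert s (1, idx)).items.map pvProjC
            rw [hinsB, herB, List.map_append]
            rfl
          · apply PySem.Dict.ext
            rw [PySem.Dict.items_insert_of_not_contains _ idx hTc2]
            show (F.items.filter (fun p => !(p.1 == m.1))).map pvProjT ++ [(s, idx)]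
              = ((F.erase m.1).insert s (1, idx)).items.map pvProjT
            rw [hinsB, herB, List.map_append]
            rfl
        · show ((F.erase m.1).insert s (1, idx)).keys.Nodup
          simp only [PySem.Dict.keys, hinsB, herB, List.map_append]
          simp only [List.nodup_append]
          refine ⟨?_, by simp, ?_⟩
          · have : (F.items.filter (fun p => !(p.1 == m.1))).map Prod.fst
                = F.keys.filter (fun x => !(x == m.1)) := by
              show _ = List.filter _ (F.items.map _)
              rw [List.filter_map]
              rfl
            rw [this]
            exact hnd.filter _
          · intro a ha b hb
            simp only [List.map_cons, List.map_nil, List.mem_singleton] at hb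
            subst hb
            intro hab
            subst hab
            rcases List.mem_map.mp ha with ⟨q, hq, hq1⟩
            have := hallnot q (List.mem_of_mem_filter hq)
            simp [hq1] at this

theorem pvFold (N : Int) : ∀ (l : List (Int × Int)) (F : PySem.Dict Int (Int × Int)),
    F.keys.Nodup →
    l.foldl (solutionStepA N) (F.keys, PySem.Dict.mk (F.items.map pvProjC), PySem.Dict.mk (F.items.map pvProjT))
      = ((l.foldl (pvStepD N) F).keys,
         PySem.Dict.mk ((l.foldl (pvStepD N) F).items.map pvProjC),
         PySem.Dict.mk ((l.foldl (pvStepD N) F).items.map pvProjT))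
    ∧ (l.foldl (pvStepD N) F).keys.Nodup := by
  intro l
  induction l with
  | nil => intro F hnd; exact ⟨rfl, hnd⟩
  | cons p t ih =>
    intro F hnd
    obtain ⟨h1, h2⟩ := pvStep N F hnd p
    simp only [List.foldl_cons]
    rw [h1]
    exact ih (pvStepD N F p) h2

-- ========== NEW: relating the ghost dict fold to B's priority-list fold ==========

def pvConv : (Int × Int × Int) → (Int × Int × Int) := fun q => (q.2.1, q.2.2, q.1)

def pvInv (idx : Int) (D : PySem.Dict Int (Int × Int)) (order : List (Int × Int × Int)) : Prop :=
  order.Pairwise (fun a b => pvLt3 a b = true)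
  ∧ order.Perm (D.items.map pvConv)
  ∧ D.keys.Nodup
  ∧ (D.items.map (fun p => p.2.2)).Nodup
  ∧ ∀ p ∈ D.items, p.2.2 < idx

theorem pvLt3_trans (a b c : Int × Int × Int) (h1 : pvLt3 a b = true) (h2 : pvLt3 b c = true) :
    pvLt3 a c = true := by
  simp only [pvLt3, Bool.or_eq_true, Bool.and_eq_true, beq_iff_eq, decide_eq_true_eq] at h1 h2 ⊢
  omega

theorem pvLt3_total (a b : Int × Int × Int) (h : a ≠ b) :
    pvLt3 a b = true ∨ pvLt3 b a = true := by
  obtain ⟨a1, a2, a3⟩ := a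
  obtain ⟨b1, b2, b3⟩ := b
  simp only [ne_eq, Prod.mk.injEq] at h
  simp only [pvLt3, Bool.or_eq_true, Bool.and_eq_true, beq_iff_eq, decide_eq_true_eq]
  omega

-- ordered insertion, recursively (pvIns computes exactly this; pvIns_eq below)
def pvInsRec (l : List (Int × Int × Int)) (x : Int × Int × Int) : List (Int × Int × Int) :=
  match l with
  | [] => [x]
  | y :: t => if pvLt3 y x then y :: pvInsRec t x else x :: y :: t

theorem pvIns_take_drop (l : List (Int × Int × Int)) (x : Int × Int × Int) :
    pvIns l x = l.take (pvInsIdx l x) ++ [x] ++ l.drop (pvInsIdx l x) := by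
  simp [pvIns, PySem.List.slice_to_natCast, PySem.List.slice_from_natCast]

theorem pvIns_eq : ∀ (l : List (Int × Int × Int)) (x : Int × Int × Int),
    pvIns l x = pvInsRec l x := by
  intro l
  induction l with
  | nil => intro x; rw [pvIns_take_drop]; rfl
  | cons y t ih =>
    intro x
    rw [pvIns_take_drop]
    simp only [pvInsIdx]
    by_cases h : pvLt3 y x = true
    · rw [if_pos h]
      simp only [List.take_succ_cons, List.drop_succ_cons]
      rw [show pvInsRec (y :: t) x = y :: pvInsRec t x from by simp only [pvInsRec, if_pos h]]
      rw [← ih x, pvIns_take_drop]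
      simp
    · rw [if_neg h]
      simp only [List.take_zero, List.drop_zero]
      rw [show pvInsRec (y :: t) x = x :: y :: t from by simp only [pvInsRec, if_neg h]]
      simp

theorem pvInsRec_perm (l : List (Int × Int × Int)) (x : Int × Int × Int) :
    (pvInsRec l x).Perm (x :: l) := by
  induction l with
  | nil => simp [pvInsRec]
  | cons y t ih =>
    simp only [pvInsRec]
    by_cases h : pvLt3 y x = true
    · rw [if_pos h]
      exact (ih.cons y).trans (List.Perm.swap x y t)
    · rw [if_neg h]

theorem pvIns_perm (l : List (Int × Int × Int)) (x : Int × Int × Int) :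
    (pvIns l x).Perm (x :: l) := by
  rw [pvIns_eq]
  exact pvInsRec_perm l x

theorem pvIns_pairwise (x : Int × Int × Int) :
    ∀ (l : List (Int × Int × Int)), l.Pairwise (fun a b => pvLt3 a b = true) →
    (∀ y ∈ l, y ≠ x) → (pvIns l x).Pairwise (fun a b => pvLt3 a b = true) := by
  intro l
  induction l with
  | nil => intro _ _; rw [pvIns_eq]; simp [pvInsRec]
  | cons y t ih =>
    intro hp hne
    obtain ⟨hy, ht⟩ := List.pairwise_cons.mp hp
    rw [pvIns_eq] at *
    simp only [pvInsRec]
    by_cases h : pvLt3 y x = true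
    · rw [if_pos h]
      refine List.pairwise_cons.mpr
        ⟨?_, ih ht (fun z hz => hne z (List.mem_cons_of_mem _ hz))⟩
      intro z hz
      rcases List.mem_cons.mp ((pvInsRec_perm t x).mem_iff.mp hz) with h1 | h1
      · subst h1; exact h
      · exact hy z h1
    · rw [if_neg h]
      have hxy : pvLt3 x y = true := by
        rcases pvLt3_total x y (fun he => hne y List.mem_cons_self he.symm) with h1 | h1
        · exact h1
        · exact absurd h1 h
      refine List.pairwise_cons.mpr ⟨?_, hp⟩
      intro z hz
      rcases List.mem_cons.mp hz with h1 | h1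
      · subst h1; exact hxy
      · exact pvLt3_trans x y z hxy (hy z h1)

-- a pvMinFold minimum is not strictly above any list element
theorem pvMinFold_not_lt {α : Type} (lt : α → α → Bool)
    (Hirr : ∀ a, lt a a = false)
    (Hasym : ∀ a b, lt a b = true → lt b a = false)
    (H2 : ∀ a b c, lt a b = false → lt b c = false → lt a c = false) :
    ∀ (xs : List α) (v : α), pvMinFold lt xs = some v → ∀ y ∈ xs, lt y v = false := by
  intro xs
  induction xs with
  | nil => intro v h; simp [pvMinFold] at h
  | cons y ys ih =>
    intro v h z hz
    simp only [pvMinFold] at h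
    cases hys : pvMinFold lt ys with
    | none =>
      rw [hys] at h
      injection h with h
      subst h
      rw [(pvMinFold_none lt ys).mp hys] at hz
      simp at hz
      subst hz
      exact Hirr _
    | some m =>
      rw [hys] at h
      dsimp only at h
      by_cases hlt : lt m y = true
      · rw [if_pos hlt] at h
        injection h with h
        subst h
        rcases List.mem_cons.mp hz with h1 | h1
        · subst h1; exact Hasym _ _ hlt
        · exact ih _ hys z h1
      · rw [if_neg hlt] at h
        injection h with h
        subst h
        rcases List.mem_cons.mp hz with h1 | h1
        · subst h1; exact Hirr _
        · rw [Bool.not_eq_true] at hlt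
          exact H2 z m _ (ih m hys z h1) hlt

theorem pvBlex_irrefl (a : Int × Int × Int) : pvBlex a a = false := by
  simp [pvBlex]

theorem pvBlex_asymm (a b : Int × Int × Int) (h : pvBlex a b = true) : pvBlex b a = false := by
  simp only [pvBlex, Bool.or_eq_true, Bool.and_eq_true, Bool.not_eq_true',
    decide_eq_true_eq, decide_eq_false_iff_not] at h
  simp only [pvBlex, Bool.or_eq_false_iff, Bool.and_eq_false_iff, Bool.not_eq_false',
    decide_eq_true_eq, decide_eq_false_iff_not]
  omega

-- unique-key filter: the only item with key m.1 is m itself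
theorem pvFilterUniq : ∀ (l : List (Int × Int × Int)) (m : Int × Int × Int),
    (l.map Prod.fst).Nodup → m ∈ l → l.filter (fun q => q.1 == m.1) = [m] := by
  intro l
  induction l with
  | nil => intro m _ hm; simp at hm
  | cons q t ih =>
    intro m hnd hm
    simp only [List.map_cons, List.nodup_cons] at hnd
    obtain ⟨hq1, hnd'⟩ := hnd
    by_cases hqm : q.1 = m.1
    · have hqe : q = m := by
        rcases List.mem_cons.mp hm with h | h
        · exact h.symm
        · exact absurd (hqm ▸ List.mem_map_of_mem (f := Prod.fst) h) hq1
      subst hqe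
      rw [List.filter_cons_of_pos (by simp)]
      have : t.filter (fun r => r.1 == q.1) = [] := by
        rw [List.filter_eq_nil_iff]
        intro r hr
        simp only [beq_iff_eq]
        intro he
        exact hq1 (he ▸ List.mem_map_of_mem (f := Prod.fst) hr)
      rw [this]
    · have hmt : m ∈ t := by
        rcases List.mem_cons.mp hm with h | h
        · exact absurd (h ▸ rfl) hqm
        · exact h
      rw [List.filter_cons_of_neg (by simp [hqm])]
      exact ih m hnd' hmt

-- erasing the unique item with key m.1 commutes with mapping pvConv
theorem pvEraseMap : ∀ (l : List (Int × Int × Int)) (m : Int × Int × Int),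
    (l.map Prod.fst).Nodup → m ∈ l →
    (l.filter (fun q => !(q.1 == m.1))).map pvConv = (l.map pvConv).erase (pvConv m) := by
  intro l
  induction l with
  | nil => intro m _ hm; simp at hm
  | cons q t ih =>
    intro m hnd hm
    simp only [List.map_cons, List.nodup_cons] at hnd
    obtain ⟨hq1, hnd'⟩ := hnd
    by_cases hqm : q.1 = m.1
    · have hqe : q = m := by
        rcases List.mem_cons.mp hm with h | h
        · exact h.symm
        · exact absurd (hqm ▸ List.mem_map_of_mem (f := Prod.fst) h) hq1
      subst hqe
      rw [List.filter_cons_of_neg (by simp)]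
      simp only [List.map_cons, List.erase_cons_head]
      rw [List.filter_eq_self.mpr]
      intro r hr
      simp only [Bool.not_eq_eq_eq_not, Bool.not_true, beq_eq_false_iff_ne]
      intro he
      exact hq1 (he ▸ List.mem_map_of_mem (f := Prod.fst) hr)
    · have hmt : m ∈ t := by
        rcases List.mem_cons.mp hm with h | h
        · exact absurd (h ▸ rfl) hqm
        · exact h
      rw [List.filter_cons_of_pos (by simp [hqm])]
      simp only [List.map_cons]
      have hne2 : (pvConv q == pvConv m) = false := by
        simp only [pvConv, beq_eq_false_iff_ne, ne_eq, Prod.mk.injEq, not_and]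
        intro _ _ h3
        exact hqm h3
      rw [List.erase_cons_tail (by simp [hne2]), ih m hnd' hmt]

-- overwriting the unique item with key s, seen through pvConv, is remove-and-readd
theorem pvOverwriteMap : ∀ (l : List (Int × Int × Int)) (s : Int) (ct ct' : Int × Int),
    (l.map Prod.fst).Nodup → (s, ct) ∈ l →
    ((l.map (fun q => if q.1 == s then (s, ct') else q)).map pvConv).Perm
      (pvConv (s, ct') :: (l.filter (fun q => !(q.1 == s))).map pvConv) := by
  intro l
  induction l with
  | nil => intro s ct ct' _ hm; simp at hm
  | cons q t ih =>
    intro s ct ct' hnd hm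
    simp only [List.map_cons, List.nodup_cons] at hnd
    obtain ⟨hq1, hnd'⟩ := hnd
    by_cases hqs : q.1 = s
    · have hqe : q = (s, ct) := by
        rcases List.mem_cons.mp hm with h | h
        · exact h.symm
        · exact absurd (hqs ▸ List.mem_map_of_mem (f := Prod.fst) h) hq1
      subst hqe
      rw [List.filter_cons_of_neg (by simp)]
      simp only [List.map_cons]
      rw [if_pos (beq_self_eq_true s)]
      have ht : t.map (fun q => if q.1 == s then (s, ct') else q) = t := by
        conv_rhs => rw [show t = t.map id from (List.map_id t).symm]
        apply List.map_congr_left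
        intro r hr
        rw [if_neg, id]
        simp only [beq_iff_eq]
        intro he
        have h2 : r.1 ∈ t.map Prod.fst := List.mem_map_of_mem (f := Prod.fst) hr
        rw [he] at h2
        exact hq1 h2
      rw [ht]
      have hft : t.filter (fun q => !(q.1 == s)) = t := by
        rw [List.filter_eq_self]
        intro r hr
        simp only [Bool.not_eq_eq_eq_not, Bool.not_true, beq_eq_false_iff_ne]
        intro he
        have h2 : r.1 ∈ t.map Prod.fst := List.mem_map_of_mem (f := Prod.fst) hr
        rw [he] at h2
        exact hq1 h2
      rw [hft]
    · have hmt : (s, ct) ∈ t := by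
        rcases List.mem_cons.mp hm with h | h
        · exact absurd (by rw [← h]) hqs
        · exact h
      rw [List.filter_cons_of_pos (by simp [hqs])]
      simp only [List.map_cons]
      rw [if_neg (by simp [hqs] : ¬((q.1 == s) = true))]
      refine ((ih s ct ct' hnd' hmt).cons (pvConv q)).trans ?_
      exact List.Perm.swap _ _ _

-- B's membership filter answers exactly the dict lookup
theorem pvFilterOrder (D : PySem.Dict Int (Int × Int)) (order : List (Int × Int × Int))
    (hperm : order.Perm (D.items.map pvConv)) (hnd : D.keys.Nodup) (s : Int) :
    (D.get? s = none → order.filter (fun e => e.2.2 == s) = []) ∧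
    (∀ c t, D.get? s = some (c, t) → order.filter (fun e => e.2.2 == s) = [(c, t, s)]) := by
  have hpf : (order.filter (fun e => e.2.2 == s)).Perm
      ((D.items.map pvConv).filter (fun e => e.2.2 == s)) := hperm.filter _
  have hmapfilt : (D.items.map pvConv).filter (fun e => e.2.2 == s)
      = (D.items.filter (fun q => q.1 == s)).map pvConv := by
    rw [List.filter_map]
    rfl
  constructor
  · intro hg
    have hfind : List.find? (fun q => q.1 == s) D.items = none := by
      have : (List.find? (fun q => q.1 == s) D.items).map (fun x => x.2) = none := hg
      cases hf : List.find? (fun q => q.1 == s) D.items with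
      | none => rfl
      | some q => rw [hf] at this; simp at this
    have : D.items.filter (fun q => q.1 == s) = [] := by
      rw [List.filter_eq_nil_iff]
      intro q hq
      simpa using List.find?_eq_none.mp hfind q hq
    rw [hmapfilt, this] at hpf
    simpa using hpf.eq_nil
  · intro c t hg
    have hmem : (s, (c, t)) ∈ D.items := PySem.Dict.mem_items_of_get?_eq_some D hg
    rw [hmapfilt, pvFilterUniq D.items (s, (c, t)) hnd hmem] at hpf
    exact List.Perm.eq_singleton hpf

-- head of the ordered list is the lexicographic (count, time) minimum
theorem pvHeadMin (D : PySem.Dict Int (Int × Int)) (order : List (Int × Int × Int))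
    (hsort : order.Pairwise (fun a b => pvLt3 a b = true))
    (hperm : order.Perm (D.items.map pvConv))
    (htnd : (D.items.map (fun p => p.2.2)).Nodup)
    (m : Int × Int × Int) (hm : pvMinFold pvBlex D.items = some m) :
    ∃ rest, order = pvConv m :: rest := by
  have hmmem : m ∈ D.items := pvMinFold_mem _ _ _ hm
  have hcm : pvConv m ∈ order := hperm.mem_iff.mpr (List.mem_map_of_mem hmmem)
  cases horder : order with
  | nil => rw [horder] at hcm; simp at hcm
  | cons h rest =>
    refine ⟨rest, ?_⟩
    by_cases hhe : h = pvConv m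
    · rw [hhe]
    · exfalso
      rw [horder] at hcm hperm hsort
      have hcrest : pvConv m ∈ rest := by
        rcases List.mem_cons.mp hcm with h1 | h1
        · exact absurd h1.symm hhe
        · exact h1
      have hlt : pvLt3 h (pvConv m) = true :=
        (List.pairwise_cons.mp hsort).1 _ hcrest
      have hhmem : h ∈ D.items.map pvConv := hperm.mem_iff.mp List.mem_cons_self
      rcases List.mem_map.mp hhmem with ⟨q, hq, hq1⟩
      have hqm : pvBlex q m = false :=
        pvMinFold_not_lt pvBlex pvBlex_irrefl pvBlex_asymm pvBlexH2 D.items m hm q hq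
      -- unfold: h = (c_q, t_q, s_q)
      subst hq1
      simp only [pvLt3, pvConv, Bool.or_eq_true, Bool.and_eq_true, beq_iff_eq,
        decide_eq_true_eq] at hlt
      simp only [pvBlex, Bool.or_eq_false_iff, Bool.and_eq_false_iff, Bool.not_eq_false',
        decide_eq_true_eq, decide_eq_false_iff_not] at hqm
      -- cases: strictly smaller (c,t) contradicts minimality; equal (c,t) contradicts time nodup
      have hqt : q.2.2 = m.2.2 → q = m := by
        intro he
        have hinj := List.inj_on_of_nodup_map htnd
        exact hinj hq hmmem he
      rcases hlt with h1 | ⟨h1, h2⟩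
      · omega
      · rcases h2 with h2 | ⟨h2, h3⟩
        · omega
        · have : q = m := hqt h2
          subst this
          omega

-- invariant preservation for one student
theorem pvInvStep (N : Int) (hN : 1 ≤ N) (idx s : Int)
    (D : PySem.Dict Int (Int × Int)) (order : List (Int × Int × Int))
    (hinv : pvInv idx D order) :
    pvInv (idx + 1) (pvStepD N D (idx, s)) (solutionStepB N order (idx, s)) := by
  obtain ⟨hsort, hperm, hknd, htnd, htlt⟩ := hinv
  have hinjk := List.inj_on_of_nodup_map (f := Prod.fst) (by simpa [PySem.Dict.keys] using hknd)
  simp only [pvStepD, solutionStepB]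
  cases hg : D.get? s with
  | some ct =>
    obtain ⟨c, t⟩ := ct
    have hmem : (s, (c, t)) ∈ D.items := PySem.Dict.mem_items_of_get?_eq_some D hg
    have hFc : D.contains s = true := by rw [PySem.Dict.contains_eq_isSome_get?, hg]; rfl
    have hfilt := (pvFilterOrder D order hperm hknd s).2 c t hg
    rw [hfilt]
    have hitems := PySem.Dict.items_insert_of_contains D (c + 1, t) hFc
    have hkeys := PySem.Dict.keys_insert_of_contains D (c + 1, t) hFc
    have huniq : ∀ q ∈ D.items, q.1 = s → q = (s, (c, t)) := by
      intro q hq he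
      exact hinjk hq hmem he
    refine ⟨?_, ?_, ?_, ?_, ?_⟩
    · -- sortedness
      apply pvIns_pairwise
      · exact hsort.filter _
      · intro y hy
        have h2 := List.of_mem_filter hy
        simp only [Bool.not_eq_eq_eq_not, Bool.not_true, beq_eq_false_iff_ne] at h2
        intro he
        exact h2 (by rw [he])
    · -- permutation
      refine (pvIns_perm _ _).trans ?_
      have h1 : (order.filter (fun e => !(e.2.2 == s))).Perm
          ((D.items.filter (fun q => !(q.1 == s))).map pvConv) := by
        have := hperm.filter (fun e => !(e.2.2 == s))
        rw [List.filter_map] at this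
        exact this
      have h2 := pvOverwriteMap D.items s (c, t) (c + 1, t)
        (by simpa [PySem.Dict.keys] using hknd) hmem
      rw [hitems]
      refine List.Perm.trans ?_ h2.symm
      exact (h1.cons _)
    · -- keys nodup
      rw [hkeys]; exact hknd
    · -- times nodup
      rw [hitems]
      have : (D.items.map (fun q => if q.1 == s then (s, (c + 1, t)) else q)).map (fun p => p.2.2)
          = D.items.map (fun p => p.2.2) := by
        rw [List.map_map]
        apply List.map_congr_left
        intro q hq
        by_cases hqs : q.1 = s
        · have := huniq q hq hqs
          subst this
          simp
        · simp [Function.comp, hqs]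
      rw [this]
      exact htnd
    · -- time bounds
      rw [hitems]
      intro p hp
      rcases List.mem_map.mp hp with ⟨q, hq, hq1⟩
      by_cases hqs : q.1 = s
      · have := huniq q hq hqs
        subst this
        rw [if_pos (by simp)] at hq1
        have := htlt _ hq
        subst hq1
        simp at this ⊢
        omega
      · rw [if_neg (by simp [hqs])] at hq1
        subst hq1
        have := htlt q hq
        omega
  | none =>
    have hfilt := (pvFilterOrder D order hperm hknd s).1 hg
    rw [hfilt]
    have hfind : List.find? (fun q => q.1 == s) D.items = none := by
      have : (List.find? (fun q => q.1 == s) D.items).map (fun x => x.2) = none := hg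
      cases hf : List.find? (fun q => q.1 == s) D.items with
      | none => rfl
      | some q => rw [hf] at this; simp at this
    have hallnot : ∀ q ∈ D.items, (q.1 == s) = false := by
      intro q hq
      simpa using List.find?_eq_none.mp hfind q hq
    have hlen : order.length = D.items.length := by
      have := hperm.length_eq
      simpa using this
    have hsize : D.size = D.items.length := rfl
    by_cases hN2 : N ≤ (D.size : Int)
    · rw [if_pos hN2, if_pos (by rw [hlen]; omega)]
      rw [PySem.List.slice_from_one]
      -- the dict is nonempty, take the lexicographic minimum m
      have hne : D.items ≠ [] := by
        intro h0
        rw [h0] at hsize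
        simp at hsize
        omega
      obtain ⟨m, hm⟩ : ∃ m, pvMinFold pvBlex D.items = some m := by
        cases hx : pvMinFold pvBlex D.items with
        | none => exact absurd ((pvMinFold_none _ _).mp hx) hne
        | some m => exact ⟨m, rfl⟩
      have hmmem : m ∈ D.items := pvMinFold_mem _ _ _ hm
      obtain ⟨rest, hrest⟩ := pvHeadMin D order hsort hperm htnd m hm
      rw [pvMin2?_eq, hm]
      simp only [Option.map_some, Option.getD_some]
      -- rewrite B's tail
      rw [hrest]
      simp only [List.tail_cons]
      -- erased dict
      have herB : (D.erase m.1).items = D.items.filter (fun p => !(p.1 == m.1)) := rfl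
      have hBc2 : (D.erase m.1).contains s = false := by
        show (D.erase m.1).items.any (fun q => q.1 == s) = false
        rw [herB, List.any_eq_false]
        intro q hq
        simp [hallnot q (List.mem_of_mem_filter hq)]
      have hins := PySem.Dict.items_insert_of_not_contains (D.erase m.1) (1, idx) hBc2
      have hperm' : rest.Perm ((D.erase m.1).items.map pvConv) := by
        rw [herB, pvEraseMap D.items m (by simpa [PySem.Dict.keys] using hknd) hmmem]
        have h3 : (pvConv m :: rest).Perm (D.items.map pvConv) := hrest ▸ hperm
        exact (List.cons_perm_iff_perm_erase.mp h3).2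
      have hsort' : rest.Pairwise (fun a b => pvLt3 a b = true) := by
        rw [hrest] at hsort
        exact (List.pairwise_cons.mp hsort).2
      have hrestmem : ∀ y ∈ rest, y ≠ (1, idx, s) := by
        intro y hy he
        have hyo : y ∈ order := by rw [hrest]; exact List.mem_cons_of_mem _ hy
        rcases List.mem_map.mp (hperm.mem_iff.mp hyo) with ⟨q, hq, hq1⟩
        have := hallnot q hq
        rw [← hq1] at he
        simp only [pvConv, Prod.mk.injEq] at he
        simp [he.2.2] at this
      refine ⟨?_, ?_, ?_, ?_, ?_⟩
      · exact pvIns_pairwise _ rest hsort' hrestmem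
      · refine (pvIns_perm _ _).trans ?_
        rw [hins, List.map_append]
        refine List.Perm.trans ?_ (List.perm_append_singleton _ _).symm
        exact hperm'.cons _
      · show ((D.erase m.1).insert s (1, idx)).keys.Nodup
        simp only [PySem.Dict.keys, hins, herB, List.map_append]
        rw [List.nodup_append]
        refine ⟨?_, by simp, ?_⟩
        · have he : (D.items.filter (fun p => !(p.1 == m.1))).map Prod.fst
              = (D.items.map Prod.fst).filter (fun x => !(x == m.1)) := by
            rw [List.filter_map]
            rfl
          rw [he]
          exact (by simpa [PySem.Dict.keys] using hknd : (D.items.map Prod.fst).Nodup).filter _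
        · intro a ha b hb
          simp only [List.map_cons, List.map_nil, List.mem_singleton] at hb
          subst hb
          intro hab
          subst hab
          rcases List.mem_map.mp ha with ⟨q, hq, hq1⟩
          have := hallnot q (List.mem_of_mem_filter hq)
          simp [hq1] at this
      · show (((D.erase m.1).insert s (1, idx)).items.map (fun p => p.2.2)).Nodup
        rw [hins, herB, List.map_append]
        rw [List.nodup_append]
        refine ⟨?_, by simp, ?_⟩
        · exact htnd.sublist (List.filter_sublist.map _)
        · intro a ha b hb
          simp only [List.map_cons, List.map_nil, List.mem_singleton] at hb
          subst hb
          intro hab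
          subst hab
          rcases List.mem_map.mp ha with ⟨q, hq, hq1⟩
          have := htlt q (List.mem_of_mem_filter hq)
          omega
      · show ∀ p ∈ ((D.erase m.1).insert s (1, idx)).items, p.2.2 < idx + 1
        rw [hins, herB]
        intro p hp
        rcases List.mem_append.mp hp with h1 | h1
        · have := htlt p (List.mem_of_mem_filter h1)
          omega
        · simp at h1
          subst h1
          show idx < idx + 1
          omega
    · rw [if_neg hN2, if_neg (by rw [hlen]; omega)]
      have hDc : D.contains s = false := by rw [PySem.Dict.contains_eq_isSome_get?, hg]; rfl
      have hins := PySem.Dict.items_insert_of_not_contains D (1, idx) hDc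
      have hordmem : ∀ y ∈ order, y ≠ (1, idx, s) := by
        intro y hy he
        rcases List.mem_map.mp (hperm.mem_iff.mp hy) with ⟨q, hq, hq1⟩
        have := hallnot q hq
        rw [← hq1] at he
        simp only [pvConv, Prod.mk.injEq] at he
        simp [he.2.2] at this
      refine ⟨?_, ?_, ?_, ?_, ?_⟩
      · exact pvIns_pairwise _ order hsort hordmem
      · refine (pvIns_perm _ _).trans ?_
        rw [hins, List.map_append]
        refine List.Perm.trans ?_ (List.perm_append_singleton _ _).symm
        exact hperm.cons _
      · show (D.insert s (1, idx)).keys.Nodup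
        simp only [PySem.Dict.keys, hins, List.map_append]
        rw [List.nodup_append]
        refine ⟨by simpa [PySem.Dict.keys] using hknd, by simp, ?_⟩
        · intro a ha b hb
          simp only [List.map_cons, List.map_nil, List.mem_singleton] at hb
          subst hb
          intro hab
          subst hab
          rcases List.mem_map.mp ha with ⟨q, hq, hq1⟩
          have := hallnot q hq
          simp [hq1] at this
      · show ((D.insert s (1, idx)).items.map (fun p => p.2.2)).Nodup
        rw [hins, List.map_append]
        rw [List.nodup_append]
        refine ⟨htnd, by simp, ?_⟩
        · intro a ha b hb
          simp only [List.map_cons, List.map_nil, List.mem_singleton] at hb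
          subst hb
          intro hab
          subst hab
          rcases List.mem_map.mp ha with ⟨q, hq, hq1⟩
          have := htlt q hq
          omega
      · show ∀ p ∈ (D.insert s (1, idx)).items, p.2.2 < idx + 1
        rw [hins]
        intro p hp
        rcases List.mem_append.mp hp with h1 | h1
        · have := htlt p h1
          omega
        · simp at h1
          subst h1
          show idx < idx + 1
          omega

theorem pvFoldBD (N : Int) (hN : 1 ≤ N) :
    ∀ (students : List Int) (idx : Int) (D : PySem.Dict Int (Int × Int))
      (order : List (Int × Int × Int)), pvInv idx D order →
      pvInv (idx + students.length)
        ((PySem.List.enumerate students idx).foldl (pvStepD N) D)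
        ((PySem.List.enumerate students idx).foldl (solutionStepB N) order) := by
  intro students
  induction students with
  | nil => intro idx D order h; simpa using h
  | cons s t ih =>
    intro idx D order h
    rw [PySem.List.enumerate_cons]
    simp only [List.foldl_cons, List.length_cons]
    have := ih (idx + 1) _ _ (pvInvStep N hN idx s D order h)
    have harith : idx + 1 + (t.length : Int) = idx + ((t.length : Int) + 1) := by omega
    rw [harith] at this
    exact_mod_cast this

-- ===== VERDICT (by name: the statement is the Claim_ definition above) =====
theorem solution_spec : Claim_equal_solution := by
  intro N students _ hpre
  unfold Spec_solution solution solution_alt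
  rcases hpre with hnil | hN
  · subst hnil
    rfl
  · have hnd : (PySem.Dict.empty : PySem.Dict Int (Int × Int)).keys.Nodup := by
      simp [PySem.Dict.empty, PySem.Dict.keys]
    have h1 : (PySem.List.enumerate students 1).foldl (solutionStepA N)
        ([], PySem.Dict.empty, PySem.Dict.empty)
        = (((PySem.List.enumerate students 1).foldl (pvStepD N) PySem.Dict.empty).keys,
           PySem.Dict.mk (((PySem.List.enumerate students 1).foldl (pvStepD N) PySem.Dict.empty).items.map pvProjC),
           PySem.Dict.mk (((PySem.List.enumerate students 1).foldl (pvStepD N) PySem.Dict.empty).items.map pvProjT)) :=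
      (pvFold N (PySem.List.enumerate students 1) PySem.Dict.empty hnd).1
    rw [h1]
    have hinv0 : pvInv 1 PySem.Dict.empty [] := by
      refine ⟨List.Pairwise.nil, by simp [PySem.Dict.empty, PySem.Dict.items], ?_, ?_, ?_⟩
      · simpa using hnd
      · simp [PySem.Dict.empty, PySem.Dict.items]
      · intro p hp; simp [PySem.Dict.empty, PySem.Dict.items] at hp
    have hinv := pvFoldBD N hN students 1 PySem.Dict.empty [] hinv0
    obtain ⟨-, hperm, -, -, -⟩ := hinv
    -- keys of D ~ students of order
    have hkeys : ((PySem.List.enumerate students 1).foldl (solutionStepB N) []).map (fun e => e.2.2)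
        |>.Perm (((PySem.List.enumerate students 1).foldl (pvStepD N) PySem.Dict.empty).keys) := by
      have := hperm.map (fun e => e.2.2)
      simpa [List.map_map, Function.comp_def, pvConv, PySem.Dict.keys] using this
    exact (PySem.List.sorted_eq_sorted_of_perm _ _ _ (fun a b h => h) hkeys.symm)
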